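-- pv_equiv track=rewrite | github.com/jmseb3/bakjoon | 기타/17829.py | dfs
-- ===== SOURCE A (Python) =====
-- def find_num(row1, row2):
--     data = row1+row2
--     data.sort()
--     return data[-2]
--
-- def find_row(maps):
--     length = len(maps[0])
--     temp =[]
--     for x in range(0,length, 2):
--         tmp = []
--         for y in range(2):
--             tmp.append(maps[y][x:x+2])
--         temp.append(find_num(tmp[0], tmp[1]))
--     return temp
--
-- def dfs(maps):
--     length = len(maps)
--     if length == 2:
--         return find_num(maps[0],maps[1])
--     res_maps = [[0]*(length//2) for _ in range(length//2)]
--     for y in range(0,length, 2):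
--         res_maps[y//2] = find_row(maps[y:y+2])
--
--     return dfs(res_maps)
-- ===== SOURCE B (Python) =====
-- def dfs(maps):
--     # Iterative bottom-up reduction: repeatedly replace the grid by the
--     # half-size grid of second-largest values of each 2x2 block.
--     g = maps
--     while len(g) > 2:
--         n = len(g) // 2
--         g = [[sorted([g[2 * i][2 * j], g[2 * i][2 * j + 1],
--                       g[2 * i + 1][2 * j], g[2 * i + 1][2 * j + 1]])[2]
--               for j in range(n)] for i in range(n)]
--     return sorted([g[0][0], g[0][1], g[1][0], g[1][1]])[2]
-- ===== Notes on version B (the rewrite author's own statement) =====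
-- stated objective: alternative
-- what changed: Replaces the recursion through find_row/find_num slicing helpers with a single iterative while-loop that rebuilds the half-size grid by direct 2x2 index arithmetic, with no row slicing, no preallocated/overwritten result rows and no helper functions.
-- outside the precondition, e.g. on dfs([[1, 2], [3, 4, 5]]): A returns 4, B returns 3
import Mathlib
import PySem

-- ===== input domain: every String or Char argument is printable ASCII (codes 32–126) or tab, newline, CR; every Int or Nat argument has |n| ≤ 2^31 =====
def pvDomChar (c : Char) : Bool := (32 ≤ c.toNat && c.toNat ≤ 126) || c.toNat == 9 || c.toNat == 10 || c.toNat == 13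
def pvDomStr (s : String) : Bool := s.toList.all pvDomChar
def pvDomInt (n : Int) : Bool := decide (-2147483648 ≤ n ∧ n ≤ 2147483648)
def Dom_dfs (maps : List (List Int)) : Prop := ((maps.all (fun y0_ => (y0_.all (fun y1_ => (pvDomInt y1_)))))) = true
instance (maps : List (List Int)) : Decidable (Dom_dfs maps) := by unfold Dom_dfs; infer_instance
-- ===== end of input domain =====

-- B replaces the recursion through find_row/find_num slicing helpers by an iterative
-- loop that rebuilds the half-size grid with direct 2x2 index arithmetic (alternative decomposition).

-- ===== PORT A =====
-- find_num(row1, row2): sort row1+row2, return data[-2]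
def findNum (row1 row2 : List Int) : Int :=
  let data := PySem.List.sorted (row1 ++ row2) (fun x => x) false
  PySem.List.pyGetD data (-2) 0   -- data[-2]; the IndexError case (fewer than 2 cells) lies outside Pre_dfs

-- find_row(maps): for x in range(0, len(maps[0]), 2): tmp = [maps[0][x:x+2], maps[1][x:x+2]]; append find_num
def findRow (maps : List (List Int)) : List Int :=
  let length := PySem.List.len (PySem.List.pyGetD maps 0 [])
  (PySem.List.pyRange 0 length 2).foldl (fun temp x =>
    let tmp := (PySem.List.pyRange 0 2 1).foldl
      (fun tmp y => tmp ++ [PySem.List.slice (PySem.List.pyGetD maps y []) (some x) (some (x + 2))]) []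
    temp ++ [findNum (PySem.List.pyGetD tmp 0 []) (PySem.List.pyGetD tmp 1 [])]) []

-- the fold of res_maps[y//2] = ... preserves the length of res_maps (cited by decreasing_by of dfs)
theorem length_foldl_pySetD {α β : Type} (l : List β) (idx : β → Int) (f : β → α) :
    ∀ acc : List α,
      (l.foldl (fun acc y => PySem.List.pySetD acc (idx y) (f y)) acc).length = acc.length := by
  induction l with
  | nil => intro acc; rfl
  | cons h t ih => intro acc; simp [List.foldl_cons, ih, PySem.List.length_pySetD]

-- dfs(maps): literal transliteration; on length < 2 Python raises (1) or never returns (0) — outside Pre_dfs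
def dfs (maps : List (List Int)) : Int :=
  if _h2 : maps.length = 2 then
    findNum (PySem.List.pyGetD maps 0 []) (PySem.List.pyGetD maps 1 [])
  else if _hlt : maps.length < 2 then 0
  else
    dfs ((PySem.List.pyRange 0 (PySem.List.len maps) 2).foldl
      (fun acc y => PySem.List.pySetD acc (PySem.Int.floordiv y 2)
        (findRow (PySem.List.slice maps (some y) (some (y + 2)))))
      ((PySem.List.pyRange 0 (PySem.Int.floordiv (PySem.List.len maps) 2) 1).map
        (fun _ => PySem.List.pyRepeat [(0 : Int)] (PySem.Int.floordiv (PySem.List.len maps) 2))))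
termination_by maps.length
decreasing_by
  have hf : PySem.Int.floordiv (PySem.List.len maps) 2 = ((maps.length / 2 : Nat) : Int) := by
    simpa using PySem.Int.floordiv_natCast maps.length 2
  simp only [length_foldl_pySetD, List.length_map, PySem.List.length_pyRange_one, hf]
  omega

-- ===== PORT B =====
-- while len(g) > 2: g = [[sorted([g[2i][2j], g[2i][2j+1], g[2i+1][2j], g[2i+1][2j+1]])[2] for j in range(n)] for i in range(n)]
def dfs_alt (g : List (List Int)) : Int :=
  if _h : 2 < g.length then
    dfs_alt
      ((PySem.List.pyRange 0 (PySem.Int.floordiv (PySem.List.len g) 2) 1).map (fun i =>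
        (PySem.List.pyRange 0 (PySem.Int.floordiv (PySem.List.len g) 2) 1).map (fun j =>
          PySem.List.pyGetD (PySem.List.sorted
            [PySem.List.pyGetD (PySem.List.pyGetD g (2 * i) []) (2 * j) 0,
             PySem.List.pyGetD (PySem.List.pyGetD g (2 * i) []) (2 * j + 1) 0,
             PySem.List.pyGetD (PySem.List.pyGetD g (2 * i + 1) []) (2 * j) 0,
             PySem.List.pyGetD (PySem.List.pyGetD g (2 * i + 1) []) (2 * j + 1) 0]
            (fun x => x) false) 2 0)))
  else
    PySem.List.pyGetD (PySem.List.sorted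
      [PySem.List.pyGetD (PySem.List.pyGetD g 0 []) 0 0,
       PySem.List.pyGetD (PySem.List.pyGetD g 0 []) 1 0,
       PySem.List.pyGetD (PySem.List.pyGetD g 1 []) 0 0,
       PySem.List.pyGetD (PySem.List.pyGetD g 1 []) 1 0] (fun x => x) false) 2 0
termination_by g.length
decreasing_by
  have hf : PySem.Int.floordiv (PySem.List.len g) 2 = ((g.length / 2 : Nat) : Int) := by
    simpa using PySem.Int.floordiv_natCast g.length 2
  simp only [List.length_map, PySem.List.length_pyRange_one, hf]
  omega

-- ===== PRECONDITION & SPEC =====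
-- Pre_dfs restricts to the task's natural domain (Baekjoon 17829): a square grid whose side is a
-- power of two ≥ 2. It excludes ragged / odd-sized grids: on most of them A raises (IndexError) or
-- recurses forever, but on some (e.g. a 2-row grid with rows of unequal length) A still returns a
-- value accidentally computed from the ragged rows — see the cites in claim.json.
def Pre_dfs (maps : List (List Int)) : Prop :=
  2 ≤ maps.length ∧ maps.length = 2 ^ Nat.log2 maps.length ∧
    ∀ row ∈ maps, row.length = maps.length
instance (maps : List (List Int)) : Decidable (Pre_dfs maps) := by unfold Pre_dfs; infer_instance

def pvWitness_dfs : List (List Int) := [[1, 2], [3, 4]]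

def Spec_dfs (maps : List (List Int)) (out : Int) : Prop := out = dfs_alt maps
instance (maps : List (List Int)) (out : Int) : Decidable (Spec_dfs maps out) := by unfold Spec_dfs; infer_instance

-- ===== CLAIM (what is proved, stated in full; the proofs are below) =====
def Claim_equal_dfs : Prop := ∀ (maps : List (List Int)), Dom_dfs maps → Pre_dfs maps → Spec_dfs maps (dfs maps)

-- ===== LEMMAS AND PROOFS =====

-- canonical half-size grid both ports are reduced to
def blk (m : List (List Int)) (i j : Nat) : List Int :=
  [(m.getD (2 * i) []).getD (2 * j) 0, (m.getD (2 * i) []).getD (2 * j + 1) 0,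
   (m.getD (2 * i + 1) []).getD (2 * j) 0, (m.getD (2 * i + 1) []).getD (2 * j + 1) 0]

def shrinkC (m : List (List Int)) (n : Nat) : List (List Int) :=
  (List.range n).map (fun i => (List.range n).map (fun j =>
    PySem.List.pyGetD (PySem.List.sorted (blk m i j) (fun x => x) false) 2 0))

theorem getD_two_mul {α : Type} (xs : List α) (k : Nat) (d : α) :
    PySem.List.pyGetD xs (2 * (k : Int)) d = xs.getD (2 * k) d := by
  rw [show (2 * (k : Int)) = ((2 * k : Nat) : Int) by push_cast; ring, PySem.List.pyGetD_natCast]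

theorem getD_two_mul_add_one {α : Type} (xs : List α) (k : Nat) (d : α) :
    PySem.List.pyGetD xs (2 * (k : Int) + 1) d = xs.getD (2 * k + 1) d := by
  rw [show (2 * (k : Int) + 1) = ((2 * k + 1 : Nat) : Int) by push_cast; ring,
      PySem.List.pyGetD_natCast]

theorem pyGetD_neg_two_of_len_four (l : List Int) (h : l.length = 4) :
    PySem.List.pyGetD l (-2) 0 = PySem.List.pyGetD l 2 0 := by
  rw [PySem.List.pyGetD_neg_ofNat l 2 0 (by omega) (by omega),
      show (2 : Int) = ((2 : Nat) : Int) by norm_num, PySem.List.pyGetD_natCast,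
      List.getD_eq_getElem l 0 (by omega)]
  congr 1; omega

theorem findNum_pair (a b c d : Int) :
    findNum [a, b] [c, d] =
      PySem.List.pyGetD (PySem.List.sorted [a, b, c, d] (fun x => x) false) 2 0 := by
  show PySem.List.pyGetD (PySem.List.sorted ([a, b] ++ [c, d]) (fun x => x) false) (-2) 0 = _
  rw [show ([a, b] ++ [c, d]) = [a, b, c, d] from rfl]
  exact pyGetD_neg_two_of_len_four _ (by rw [PySem.List.length_sorted]; rfl)

theorem findRow_pair (r0 r1 : List Int) :
    findRow [r0, r1] = (PySem.List.pyRange 0 ((r0.length : Int)) 2).map (fun x =>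
      findNum (PySem.List.slice r0 (some x) (some (x + 2)))
              (PySem.List.slice r1 (some x) (some (x + 2)))) := by
  unfold findRow
  have h01 : PySem.List.pyRange 0 2 1 = [0, 1] := by decide
  simp only [h01, List.foldl_cons, List.foldl_nil, PySem.List.pyGetD_zero_cons,
    PySem.List.len_eq]
  have h2 : ∀ s0 s1 : List Int, PySem.List.pyGetD [s0, s1] 1 ([] : List Int) = s1 := fun _ _ => rfl
  simp only [h2, List.nil_append]
  exact PySem.List.foldl_append_singleton_eq_map _ _ []

theorem pyRange_two (n : Nat) :
    PySem.List.pyRange 0 ((2 * n : Nat) : Int) 2 =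
      (List.range n).map (fun i => ((2 * i : Nat) : Int)) := by
  rw [PySem.List.pyRange_of_pos 0 ((2 * n : Nat) : Int) (by norm_num)]
  by_cases hn : n = 0
  · subst hn; simp
  · rw [if_pos (by exact_mod_cast Nat.pos_of_ne_zero (by omega))]
    have he : ((((2 * n : Nat) : Int) - 0 + 2 - 1) / 2).toNat = n := by omega
    rw [he]
    exact List.map_congr_left (fun k _ => by push_cast; ring)

theorem foldl_set_range {α : Type} (f : Nat → α) :
    ∀ (n : Nat) (acc : List α), n ≤ acc.length →
      (List.range n).foldl (fun a i => a.set i (f i)) acc =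
        (List.range n).map f ++ acc.drop n := by
  intro n
  induction n with
  | zero => intro acc _; simp
  | succ n ih =>
    intro acc hlen
    rw [List.range_succ, List.foldl_append, List.foldl_cons, List.foldl_nil,
        ih acc (by omega), List.map_append]
    have hmaplen : ((List.range n).map f).length = n := by simp
    rw [List.set_append]
    rw [if_neg (by omega), hmaplen, Nat.sub_self]
    have hdrop : acc.drop n = acc[n] :: acc.drop (n + 1) :=
      (List.getElem_cons_drop (by omega)).symm
    rw [hdrop, List.set_cons_zero]
    simp

theorem take_two_drop {α : Type} (xs : List α) (k : Nat) (h : k + 1 < xs.length) :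
    (xs.drop k).take 2 = [xs[k], xs[k + 1]] := by
  rw [List.drop_eq_getElem_cons (by omega), List.drop_eq_getElem_cons (h := h)]
  rfl

theorem slice_two {α : Type} (xs : List α) (m : Nat) (h : m + 1 < xs.length) :
    PySem.List.slice xs (some (m : Int)) (some ((m : Int) + 2)) = [xs[m], xs[m + 1]] := by
  rw [show ((m : Int) + 2) = ((m : Int) + ((2 : Nat) : Int)) by norm_num,
      PySem.List.slice_natCast_add, take_two_drop xs m h]

theorem floordiv_len_two (g : List (List Int)) (n : Nat) (hn : g.length = 2 * n) :
    PySem.Int.floordiv (PySem.List.len g) 2 = (n : Int) := by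
  have h2 : PySem.Int.floordiv ((2 * n : Nat) : Int) (((2 : Nat) : Int)) = ((2 * n / 2 : Nat) : Int) :=
    PySem.Int.floordiv_natCast (2 * n) 2
  have hq : 2 * n / 2 = n := by omega
  rw [PySem.List.len_eq, hn]
  simpa [hq] using h2

theorem pyRange_one_nat (n : Nat) :
    PySem.List.pyRange 0 (n : Int) 1 = (List.range n).map (fun k => ((k : Nat) : Int)) := by
  rw [PySem.List.pyRange_one]
  have h : ((n : Int) - 0).toNat = n := by omega
  rw [h]
  exact List.map_congr_left (fun k _ => by omega)

-- the half-size grid A's loop builds IS shrinkC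
theorem a_step (maps : List (List Int)) (n : Nat) (hn : maps.length = 2 * n)
    (hrows : ∀ row ∈ maps, row.length = maps.length) :
    ((PySem.List.pyRange 0 (PySem.List.len maps) 2).foldl
      (fun acc y => PySem.List.pySetD acc (PySem.Int.floordiv y 2)
        (findRow (PySem.List.slice maps (some y) (some (y + 2)))))
      ((PySem.List.pyRange 0 (PySem.Int.floordiv (PySem.List.len maps) 2) 1).map
        (fun _ => PySem.List.pyRepeat [(0 : Int)] (PySem.Int.floordiv (PySem.List.len maps) 2))))
      = shrinkC maps n := by
  have hL : PySem.List.len maps = ((2 * n : Nat) : Int) := by simp [PySem.List.len_eq, hn]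
  rw [floordiv_len_two maps n hn, hL, pyRange_two, List.foldl_map]
  have hlen0 : ((PySem.List.pyRange 0 (n : Int) 1).map
      (fun _ => PySem.List.pyRepeat [(0 : Int)] (n : Int))).length = n := by
    simp [PySem.List.length_pyRange_one]
  -- rewrite each iteration into a plain List.set at index i
  have hstep : ∀ (acc : List (List Int)) (i : Nat), i ∈ List.range n →
      PySem.List.pySetD acc (PySem.Int.floordiv ((2 * i : Nat) : Int) 2)
        (findRow (PySem.List.slice maps (some ((2 * i : Nat) : Int))
          (some (((2 * i : Nat) : Int) + 2))))
      = acc.set i (findRow (PySem.List.slice maps (some ((2 * i : Nat) : Int))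
          (some (((2 * i : Nat) : Int) + 2)))) := by
    intro acc i _
    have hdiv : PySem.Int.floordiv ((2 * i : Nat) : Int) 2 = (i : Int) := by
      have := PySem.Int.floordiv_natCast (2 * i) 2
      have hq : 2 * i / 2 = i := by omega
      simpa [hq] using this
    rw [hdiv, PySem.List.pySetD_natCast]
  rw [PySem.List.foldl_congr_mem _ _ _ _ hstep]
  rw [foldl_set_range _ n _ (by omega)]
  rw [show (((PySem.List.pyRange 0 (n : Int) 1).map
      (fun _ => PySem.List.pyRepeat [(0 : Int)] (n : Int))).drop n) = [] from
    List.drop_eq_nil_of_le (by omega), List.append_nil]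
  unfold shrinkC
  refine List.map_congr_left (fun i hi => ?_)
  have hi' : i < n := List.mem_range.mp hi
  have h2i : 2 * i + 1 < maps.length := by omega
  rw [slice_two maps (2 * i) h2i, findRow_pair]
  have hr0len : maps[2 * i].length = 2 * n := by
    rw [hrows maps[2 * i] (List.getElem_mem _), hn]
  have hr1len : maps[2 * i + 1].length = 2 * n := by
    rw [hrows maps[2 * i + 1] (List.getElem_mem _), hn]
  rw [hr0len]
  rw [show ((2 * n : Nat) : Int) = (((2 * n : Nat) : Nat) : Int) from rfl, pyRange_two,
      List.map_map]
  refine List.map_congr_left (fun j hj => ?_)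
  have hj' : j < n := List.mem_range.mp hj
  simp only [Function.comp_apply]
  rw [slice_two maps[2 * i] (2 * j) (by omega), slice_two maps[2 * i + 1] (2 * j) (by omega),
      findNum_pair]
  unfold blk
  rw [List.getD_eq_getElem maps [] (n := 2 * i) (by omega),
      List.getD_eq_getElem maps [] (n := 2 * i + 1) (by omega),
      List.getD_eq_getElem maps[2 * i] 0 (n := 2 * j) (by omega),
      List.getD_eq_getElem maps[2 * i] 0 (n := 2 * j + 1) (by omega),
      List.getD_eq_getElem maps[2 * i + 1] 0 (n := 2 * j) (by omega),
      List.getD_eq_getElem maps[2 * i + 1] 0 (n := 2 * j + 1) (by omega)]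

-- the half-size grid B's loop builds IS shrinkC
theorem b_step (g : List (List Int)) (n : Nat) (hn : g.length = 2 * n) :
    ((PySem.List.pyRange 0 (PySem.Int.floordiv (PySem.List.len g) 2) 1).map (fun i =>
      (PySem.List.pyRange 0 (PySem.Int.floordiv (PySem.List.len g) 2) 1).map (fun j =>
        PySem.List.pyGetD (PySem.List.sorted
          [PySem.List.pyGetD (PySem.List.pyGetD g (2 * i) []) (2 * j) 0,
           PySem.List.pyGetD (PySem.List.pyGetD g (2 * i) []) (2 * j + 1) 0,
           PySem.List.pyGetD (PySem.List.pyGetD g (2 * i + 1) []) (2 * j) 0,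
           PySem.List.pyGetD (PySem.List.pyGetD g (2 * i + 1) []) (2 * j + 1) 0]
          (fun x => x) false) 2 0)))
      = shrinkC g n := by
  rw [floordiv_len_two g n hn, pyRange_one_nat, List.map_map]
  unfold shrinkC
  apply List.map_congr_left
  intro i _
  simp only [Function.comp_apply]
  rw [List.map_map]
  refine List.map_congr_left (fun j _ => ?_)
  simp only [Function.comp_apply, getD_two_mul, getD_two_mul_add_one, blk]

theorem pre_shrink (maps : List (List Int)) (hpre : Pre_dfs maps) (hgt : 2 < maps.length) :
    Pre_dfs (shrinkC maps (maps.length / 2)) := by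
  obtain ⟨h2, hpow, hrows⟩ := hpre
  have hk2 : 2 ≤ Nat.log2 maps.length := by
    rcases hk : Nat.log2 maps.length with _ | _ | k
    · rw [hk] at hpow; omega
    · rw [hk] at hpow; omega
    · omega
  have hhalf : maps.length / 2 = 2 ^ (Nat.log2 maps.length - 1) := by
    obtain ⟨k, hk, hkk⟩ : ∃ k, maps.length = 2 ^ k ∧ k = Nat.log2 maps.length :=
      ⟨Nat.log2 maps.length, hpow, rfl⟩
    have hp := pow_succ 2 (k - 1)
    rw [show k - 1 + 1 = k from by omega] at hp
    rw [← hkk]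
    omega
  have hge : 2 ≤ maps.length / 2 := by
    rw [hhalf]
    calc 2 = 2 ^ 1 := rfl
    _ ≤ 2 ^ (Nat.log2 maps.length - 1) := Nat.pow_le_pow_right (by omega) (by omega)
  have hlen : (shrinkC maps (maps.length / 2)).length = maps.length / 2 := by
    simp [shrinkC]
  refine ⟨by omega, ?_, ?_⟩
  · rw [hlen, hhalf, Nat.log2_two_pow]
  · intro row hrow
    rw [hlen]
    unfold shrinkC at hrow
    obtain ⟨i, _, rfl⟩ := List.mem_map.mp hrow
    simp

theorem main_lemma : ∀ L (maps : List (List Int)), maps.length = L → Pre_dfs maps →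
    dfs maps = dfs_alt maps := by
  intro L
  induction L using Nat.strong_induction_on with
  | _ L ih =>
    intro maps hL hpre
    obtain ⟨h2, hpow, hrows⟩ := hpre
    by_cases hbase : maps.length = 2
    · -- 2x2 grid: both take the base branch
      rw [dfs, dif_pos hbase, dfs_alt, dif_neg (by omega)]
      obtain ⟨r0, r1, rfl⟩ := List.length_eq_two.mp hbase
      have hr0 : r0.length = 2 := (hrows r0 (by simp)).trans hbase
      have hr1 : r1.length = 2 := (hrows r1 (by simp)).trans hbase
      obtain ⟨a, b, rfl⟩ := List.length_eq_two.mp hr0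
      obtain ⟨c, d, rfl⟩ := List.length_eq_two.mp hr1
      rw [show PySem.List.pyGetD [[a, b], [c, d]] 0 ([] : List Int) = [a, b] from rfl,
          show PySem.List.pyGetD [[a, b], [c, d]] 1 ([] : List Int) = [c, d] from rfl,
          findNum_pair]
      rfl
    · -- larger grid: one reduction step on each side, then the induction hypothesis
      have hgt : 2 < maps.length := by omega
      have hk2 : 2 ≤ Nat.log2 maps.length := by
        rcases hk : Nat.log2 maps.length with _ | _ | k
        · rw [hk] at hpow; omega
        · rw [hk] at hpow; omega
        · omega
      have heven : maps.length = 2 * (maps.length / 2) := by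
        obtain ⟨k, hk, hkk⟩ : ∃ k, maps.length = 2 ^ k ∧ 2 ≤ k :=
          ⟨Nat.log2 maps.length, hpow, hk2⟩
        have hp := pow_succ 2 (k - 1)
        rw [show k - 1 + 1 = k from by omega] at hp
        omega
      rw [dfs, dif_neg hbase, dif_neg (by omega),
          a_step maps (maps.length / 2) heven hrows,
          dfs_alt, dif_pos hgt, b_step maps (maps.length / 2) heven]
      have hpre' := pre_shrink maps ⟨h2, hpow, hrows⟩ hgt
      have hlen' : (shrinkC maps (maps.length / 2)).length = maps.length / 2 := by
        simp [shrinkC]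
      exact ih (shrinkC maps (maps.length / 2)).length (by omega) _ rfl hpre'

-- ===== VERDICT (by name: the statement is the Claim_ definition above) =====
theorem dfs_spec : Claim_equal_dfs := by
  unfold Claim_equal_dfs
  intro maps _ hpre
  unfold Spec_dfs
  exact main_lemma maps.length maps rfl hpre
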